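-- pv_equiv track=rewrite | github.com/Miguyy/AED-class | AED/RSF8/bin2_paises.py | imprimePais
-- ===== SOURCE A (Python) =====
-- def imprimePais(nome_pais, tentativas_restantes):
--
--     num_revelar = 3 - tentativas_restantes
--     revelado = ""
--     for i, char in enumerate(nome_pais):
--         if i < num_revelar:
--             revelado += char
--         else:
--             revelado += "-"
--     return revelado
-- ===== SOURCE B (Python) =====
-- def imprimePais(nome_pais, tentativas_restantes):
--     reveal = max(0, 3 - tentativas_restantes)
--     return nome_pais[:reveal] + "-" * (len(nome_pais) - reveal)
-- ===== Notes on version B (the rewrite author's own statement) =====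
-- stated objective: simpler
-- what changed: Replaces the per-character enumerate loop with an index branch by a two-segment construction: slice the revealed prefix and append a block of dashes via string multiplication.
import Mathlib
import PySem

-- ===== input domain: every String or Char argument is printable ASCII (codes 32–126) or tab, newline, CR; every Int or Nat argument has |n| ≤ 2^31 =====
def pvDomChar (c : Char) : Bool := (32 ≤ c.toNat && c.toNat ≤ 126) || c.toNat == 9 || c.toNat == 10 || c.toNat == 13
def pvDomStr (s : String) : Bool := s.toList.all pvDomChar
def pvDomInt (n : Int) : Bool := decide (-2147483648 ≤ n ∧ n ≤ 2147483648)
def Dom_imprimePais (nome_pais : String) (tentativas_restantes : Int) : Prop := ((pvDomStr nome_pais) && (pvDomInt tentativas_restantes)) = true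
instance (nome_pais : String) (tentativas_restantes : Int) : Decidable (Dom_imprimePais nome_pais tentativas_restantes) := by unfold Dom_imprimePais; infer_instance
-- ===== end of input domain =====

-- ===== PORT A =====
-- literal port of A: fold over enumerate(nome_pais), appending char or '-' to the accumulator
def imprimePais (nome_pais : String) (tentativas_restantes : Int) : String :=
  let num_revelar : Int := 3 - tentativas_restantes
  (PySem.List.enumerate nome_pais.toList).foldl
    (fun revelado p => if p.1 < num_revelar then revelado.push p.2 else revelado.push '-') ""

-- ===== PORT B =====
-- port of B: revealed prefix slice ++ a block of dashes
def imprimePais_alt (nome_pais : String) (tentativas_restantes : Int) : String :=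
  let reveal : Nat := (max 0 (3 - tentativas_restantes)).toNat
  String.ofList (nome_pais.toList.take reveal ++ List.replicate (nome_pais.toList.length - reveal) '-')

-- ===== PRECONDITION & SPEC =====
def Spec_imprimePais (nome_pais : String) (tentativas_restantes : Int) (out : String) : Prop := out = imprimePais_alt nome_pais tentativas_restantes
instance (nome_pais : String) (tentativas_restantes : Int) (out : String) : Decidable (Spec_imprimePais nome_pais tentativas_restantes out) := by unfold Spec_imprimePais; infer_instance

-- ===== CLAIM (what is proved, stated in full; the proofs are below) =====
def Claim_equal_imprimePais : Prop := ∀ (nome_pais : String) (tentativas_restantes : Int), Dom_imprimePais nome_pais tentativas_restantes → Spec_imprimePais nome_pais tentativas_restantes (imprimePais nome_pais tentativas_restantes)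

-- ===== LEMMAS AND PROOFS =====
-- B builds the result as revealed-prefix ++ dash-block instead of A's per-character loop (objective: simpler).

lemma push_eq_append (a : String) (c : Char) : a.push c = a ++ String.ofList [c] :=
  (String.append_left_inj a).mp rfl

lemma ofList_cons' (c : Char) (l : List Char) :
    String.ofList (c :: l) = String.ofList [c] ++ String.ofList l := by
  rw [show (c :: l) = [c] ++ l from rfl, String.ofList_append]

lemma foldl_enum_mask (cs : List Char) : ∀ (s num : Int) (acc : String),
    (PySem.List.enumerate cs s).foldl
      (fun revelado p => if p.1 < num then revelado.push p.2 else revelado.push '-') acc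
    = acc ++ String.ofList (cs.take (num - s).toNat ++ List.replicate (cs.length - (num - s).toNat) '-') := by
  induction cs with
  | nil => intro s num acc; simp [PySem.List.enumerate_nil]
  | cons c cs ih =>
    intro s num acc
    rw [PySem.List.enumerate_cons]
    simp only [List.foldl_cons]
    by_cases h : s < num
    · have hk : (num - s).toNat = ((num - (s+1)).toNat) + 1 := by omega
      rw [if_pos h, ih (s+1) num, hk]
      simp only [List.take_succ_cons, List.length_cons, Nat.succ_sub_succ, List.cons_append]
      rw [push_eq_append, ofList_cons', String.append_assoc]
      simp [← String.ofList_append]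
    · have hk0 : (num - s).toNat = 0 := by omega
      have hk1 : (num - (s+1)).toNat = 0 := by omega
      rw [if_neg h, ih (s+1) num, hk0, hk1]
      simp only [List.take_zero, List.nil_append, Nat.sub_zero, List.length_cons, List.replicate_succ]
      rw [push_eq_append, ofList_cons', String.append_assoc]
      simp [← String.ofList_append]
      rw [ofList_cons']

-- ===== VERDICT (by name: the statement is the Claim_ definition above) =====
theorem imprimePais_spec : Claim_equal_imprimePais := by
  intro nome_pais tentativas_restantes _
  unfold Spec_imprimePais imprimePais imprimePais_alt
  rw [foldl_enum_mask]
  have h2 : (3 - tentativas_restantes - 0).toNat = (max 0 (3 - tentativas_restantes)).toNat := by omega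
  rw [h2]
  simp
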